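-- pv_equiv track=rewrite | github.com/coseeing/WordBridge | addon/globalPlugins/WordBridge/lib/utils.py | get_segments_to_recorrect
-- ===== SOURCE A (Python) =====
-- def get_segments_to_recorrect(segments: list, typo_indices: list, max_length: int = 30) -> tuple:
-- 	text = "".join(segments)
-- 	segments_to_correct = []
-- 	index_start = 0
-- 	index_end = 0
-- 	for k in range(len(segments)):
-- 		is_error = False
-- 		index_end += len(segments[k])
-- 		text_with_tag = ""
-- 		for j in range(index_start, index_end):
-- 			if j in typo_indices:
-- 				is_error = True
-- 				text_with_tag += ("[[" + text[j] + "]]")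
-- 			else:
-- 				text_with_tag += text[j]
-- 		if is_error:
-- 			segments_to_correct.append(text_with_tag)
-- 		else:
-- 			segments_to_correct.append("")
-- 		index_start = index_end
--
-- 	return segments_to_correct
-- ===== SOURCE B (Python) =====
-- def get_segments_to_recorrect(segments: list, typo_indices: list, max_length: int = 30) -> tuple:
-- 	# Recursive decomposition: handle the first segment against locally shifted
-- 	# typo indices, then recurse on the rest with all indices shifted left.
-- 	if not segments:
-- 		return []
-- 	seg = segments[0]
-- 	n = len(seg)
-- 	here = {t for t in typo_indices if 0 <= t < n}
-- 	if here:
-- 		first = "".join("[[" + c + "]]" if i in here else c for i, c in enumerate(seg))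
-- 	else:
-- 		first = ""
-- 	return [first] + get_segments_to_recorrect(segments[1:], [t - n for t in typo_indices], max_length)
-- ===== Notes on version B (the rewrite author's own statement) =====
-- stated objective: alternative
-- what changed: Replaces A's iterative scan over the joined text (testing every global character index for membership in the typo list) by a structural recursion on the segments that filters the typo indices into a local set per segment and shifts them left before recursing; no joined text or running offsets are kept.
import Mathlib
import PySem

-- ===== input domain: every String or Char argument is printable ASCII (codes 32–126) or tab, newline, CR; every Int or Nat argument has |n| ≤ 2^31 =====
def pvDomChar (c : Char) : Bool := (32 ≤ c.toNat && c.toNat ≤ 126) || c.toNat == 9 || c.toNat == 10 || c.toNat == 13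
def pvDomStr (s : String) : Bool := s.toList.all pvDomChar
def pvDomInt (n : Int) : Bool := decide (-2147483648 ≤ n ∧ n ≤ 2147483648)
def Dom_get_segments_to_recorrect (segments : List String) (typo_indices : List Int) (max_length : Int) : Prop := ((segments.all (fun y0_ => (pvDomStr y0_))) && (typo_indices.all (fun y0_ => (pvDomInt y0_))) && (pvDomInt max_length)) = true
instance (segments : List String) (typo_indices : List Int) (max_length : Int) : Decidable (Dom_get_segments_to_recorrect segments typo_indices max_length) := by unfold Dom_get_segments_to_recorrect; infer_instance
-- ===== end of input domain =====

-- B replaces A's scan of the joined text (membership test of every global index in the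
-- typo list) by a recursion on the segments that shifts the typo indices locally;
-- return values agree everywhere (objective: alternative decomposition).

-- ===== PORT A =====
-- the body of A's inner loop over j in range(index_start, index_end);
-- text[j] is ported as getD with a dummy default: the loop only visits j < len(text),
-- so Python's IndexError branch is unreachable
def pvTagBody (text : List Char) (typo_indices : List Int) (st : Bool × List Char) (j : Nat) : Bool × List Char :=
  if (j : Int) ∈ typo_indices then (true, st.2 ++ ['[', '[', text.getD j ' ', ']', ']'])
  else (st.1, st.2 ++ [text.getD j ' '])

def pvTagLoop (text : List Char) (typo_indices : List Int) (a b : Nat) : Bool × List Char :=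
  (List.range' a (b - a)).foldl (pvTagBody text typo_indices) (false, [])

-- the body of A's outer loop; state = (segments_to_correct, index_start, index_end)
def pvStep (text : List Char) (typo_indices : List Int) (st : List String × Nat × Nat) (seg : String) : List String × Nat × Nat :=
  let indexEnd := st.2.2 + seg.length
  let r := pvTagLoop text typo_indices st.2.1 indexEnd
  (st.1 ++ [if r.1 then String.mk r.2 else ""], indexEnd, indexEnd)

def get_segments_to_recorrect (segments : List String) (typo_indices : List Int) (max_length : Int) : List String :=
  let text := (String.join segments).toList
  (segments.foldl (pvStep text typo_indices) ([], 0, 0)).1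

-- ===== PORT B =====
def get_segments_to_recorrect_alt (segments : List String) (typo_indices : List Int) (max_length : Int) : List String :=
  match segments with
  | [] => []
  | seg :: rest =>
    let n := seg.length
    let here : PySem.Set Int :=
      PySem.Set.ofList (typo_indices.filter fun t => decide (0 ≤ t) && decide (t < (n : Int)))
    let first :=
      if here.isEmpty then ""
      else String.mk ((PySem.List.enumerate seg.toList 0).flatMap fun p =>
        if p.1 ∈ here then ['[', '[', p.2, ']', ']'] else [p.2])
    first :: get_segments_to_recorrect_alt rest (typo_indices.map fun t => t - (n : Int)) max_length

-- ===== PRECONDITION & SPEC =====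
def Spec_get_segments_to_recorrect (segments : List String) (typo_indices : List Int) (max_length : Int) (out : List String) : Prop := out = get_segments_to_recorrect_alt segments typo_indices max_length
instance (segments : List String) (typo_indices : List Int) (max_length : Int) (out : List String) : Decidable (Spec_get_segments_to_recorrect segments typo_indices max_length out) := by unfold Spec_get_segments_to_recorrect; infer_instance

-- ===== CLAIM (what is proved, stated in full; the proofs are below) =====
def Claim_equal_get_segments_to_recorrect : Prop := ∀ (segments : List String) (typo_indices : List Int) (max_length : Int), Dom_get_segments_to_recorrect segments typo_indices max_length → Spec_get_segments_to_recorrect segments typo_indices max_length (get_segments_to_recorrect segments typo_indices max_length)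

-- ===== LEMMAS AND PROOFS =====

-- membership of a global index in the typo list, as a Boolean predicate
def pvP (typo_indices : List Int) (j : Nat) : Bool := decide ((j : Int) ∈ typo_indices)

-- reference rendering of one segment's characters, indices offset by i
def pvRender (p : Nat → Bool) : List Char → Nat → List Char
  | [], _ => []
  | c :: cs, i => (if p i then ['[', '[', c, ']', ']'] else [c]) ++ pvRender p cs (i + 1)

def pvAny (p : Nat → Bool) : List Char → Nat → Bool
  | [], _ => false
  | _ :: cs, i => p i || pvAny p cs (i + 1)

-- reference result: per-segment tagged strings, offset accumulated
def pvSpecList (typo_indices : List Int) : Nat → List (List Char) → List String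
  | _, [] => []
  | a, cs :: rest =>
    (if pvAny (pvP typo_indices) cs a then String.mk (pvRender (pvP typo_indices) cs a) else "")
      :: pvSpecList typo_indices (a + cs.length) rest

theorem pvAny_iff (p : Nat → Bool) (cs : List Char) (i : Nat) :
    pvAny p cs i = true ↔ ∃ k, k < cs.length ∧ p (i + k) = true := by
  induction cs generalizing i with
  | nil => simp [pvAny]
  | cons c cs ih =>
    simp only [pvAny, Bool.or_eq_true, ih]
    constructor
    · rintro (h | ⟨k, hk, hp⟩)
      · exact ⟨0, by simp, by simpa using h⟩
      · refine ⟨k + 1, by simp only [List.length_cons]; omega, ?_⟩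
        have h1 : i + (k + 1) = i + 1 + k := by omega
        rwa [h1]
    · rintro ⟨k, hk, hp⟩
      cases k with
      | zero => exact Or.inl (by simpa using hp)
      | succ k =>
        refine Or.inr ⟨k, by simp only [List.length_cons] at hk; omega, ?_⟩
        have h1 : i + 1 + k = i + (k + 1) := by omega
        rwa [h1]

theorem pvRender_congr (p q : Nat → Bool) (cs : List Char) (i : Nat)
    (h : ∀ j, i ≤ j → j < i + cs.length → p j = q j) :
    pvRender p cs i = pvRender q cs i := by
  induction cs generalizing i with
  | nil => rfl
  | cons c cs ih =>
    simp only [pvRender]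
    rw [h i (le_refl _) (by simp), ih (i + 1) (fun j h1 h2 => h j (by omega) (by simp at h2 ⊢; omega))]

theorem pvRender_shift (p : Nat → Bool) (cs : List Char) (a i : Nat) :
    pvRender (fun j => p (a + j)) cs i = pvRender p cs (a + i) := by
  induction cs generalizing i with
  | nil => rfl
  | cons c cs ih => simp only [pvRender]; rw [ih (i + 1)]; ring_nf

theorem pv_toList_join (l : List String) :
    (String.join l).toList = (l.map String.toList).flatten := by
  have h : ∀ (l : List String) (s : String),
      (l.foldl (· ++ ·) s).toList = s.toList ++ (l.map String.toList).flatten := by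
    intro l
    induction l with
    | nil => simp
    | cons x xs ih => intro s; rw [List.foldl_cons, ih (s ++ x)]; simp [String.toList_append]
  simpa [String.join] using h l ""

-- A's inner loop, characterised
theorem pvTagLoop_go (cs : List Char) (pre suf : List Char) (typo_indices : List Int)
    (st : Bool × List Char) :
    (List.range' pre.length cs.length).foldl (pvTagBody (pre ++ cs ++ suf) typo_indices) st
      = (st.1 || pvAny (pvP typo_indices) cs pre.length,
         st.2 ++ pvRender (pvP typo_indices) cs pre.length) := by
  induction cs generalizing pre st with
  | nil => simp [pvAny, pvRender]
  | cons c cs ih =>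
    simp only [List.length_cons]
    rw [List.range'_succ, List.foldl_cons]
    have hget : (pre ++ (c :: cs) ++ suf).getD pre.length ' ' = c := by
      simp [List.getD_eq_getElem?_getD]
    have hre : pre ++ (c :: cs) ++ suf = (pre ++ [c]) ++ cs ++ suf := by simp
    have hlen : pre.length + 1 = (pre ++ [c]).length := by simp
    rw [hre, hlen, ih (pre ++ [c])]
    simp only [pvTagBody, ← hre, hget, pvAny, pvRender, pvP]
    by_cases h : (pre.length : Int) ∈ typo_indices <;>
      simp [h, ← hlen, List.append_assoc]

-- A's outer loop, characterised
theorem pvA_go (segs : List String) (pre : List Char) (acc : List String)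
    (typo_indices : List Int) :
    (segs.foldl (pvStep (pre ++ (segs.map String.toList).flatten) typo_indices)
        (acc, pre.length, pre.length)).1
      = acc ++ pvSpecList typo_indices pre.length (segs.map String.toList) := by
  induction segs generalizing pre acc with
  | nil => simp [pvSpecList]
  | cons seg rest ih =>
    simp only [List.map_cons, List.flatten_cons, List.foldl_cons]
    have htext : pre ++ (seg.toList ++ (rest.map String.toList).flatten)
        = (pre ++ seg.toList) ++ (rest.map String.toList).flatten := by simp
    have hlen : seg.length = seg.toList.length := Eq.symm String.length_toList
    have hstep : pvStep (pre ++ (seg.toList ++ (rest.map String.toList).flatten)) typo_indices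
        (acc, pre.length, pre.length) seg
        = (acc ++ [if pvAny (pvP typo_indices) seg.toList pre.length then
              String.mk (pvRender (pvP typo_indices) seg.toList pre.length) else ""],
           pre.length + seg.toList.length, pre.length + seg.toList.length) := by
      simp only [pvStep, pvTagLoop]
      have h1 : pre.length + seg.length - pre.length = seg.toList.length := by omega
      rw [h1]
      have h2 := pvTagLoop_go seg.toList pre ((rest.map String.toList).flatten) typo_indices (false, [])
      simp only [List.append_assoc] at h2 ⊢
      rw [h2]
      simp only [Bool.false_or, List.nil_append, hlen]
    rw [hstep, htext]
    have hlen2 : pre.length + seg.toList.length = (pre ++ seg.toList).length := by simp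
    rw [hlen2, ih (pre ++ seg.toList)]
    simp [pvSpecList, ← hlen2]

-- B's rendering comprehension, characterised (local indices, membership test Q)
theorem pvB_render (cs : List Char) (s : Nat) (Q : Int → Prop) [DecidablePred Q] :
    ((PySem.List.enumerate cs (s : Int)).flatMap fun p =>
        if Q p.1 then ['[', '[', p.2, ']', ']'] else [p.2])
      = pvRender (fun j => decide (Q (j : Int))) cs s := by
  induction cs generalizing s with
  | nil => simp [pvRender]
  | cons c cs ih =>
    rw [PySem.List.enumerate_cons, List.flatMap_cons]
    have h1 : ((s : Int) + 1) = ((s + 1 : Nat) : Int) := by push_cast; ring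
    rw [h1, ih (s + 1)]
    by_cases h : Q (s : Int) <;> simp [pvRender, h]

-- B, characterised against the reference (typo indices shifted left by a)
theorem pvB_go (segs : List String) (typo_indices : List Int) (ml : Int) (a : Nat) :
    get_segments_to_recorrect_alt segs (typo_indices.map fun t => t - (a : Int)) ml
      = pvSpecList typo_indices a (segs.map String.toList) := by
  induction segs generalizing typo_indices a with
  | nil => simp [get_segments_to_recorrect_alt, pvSpecList]
  | cons seg rest ih =>
    simp only [get_segments_to_recorrect_alt, List.map_cons, pvSpecList]
    have hlen : seg.length = seg.toList.length := Eq.symm String.length_toList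
    set here : PySem.Set Int := PySem.Set.ofList ((typo_indices.map fun t => t - (a : Int)).filter
        fun t => decide (0 ≤ t) && decide (t < (seg.length : Int))) with hhere
    have hmem : ∀ (x : Int), x ∈ here
        ↔ (0 ≤ x ∧ x < (seg.length : Int) ∧ (x + a) ∈ typo_indices) := by
      intro x
      rw [hhere, PySem.Set.mem_ofList, List.mem_filter, List.mem_map]
      constructor
      · rintro ⟨⟨t, ht, rfl⟩, h2⟩
        simp only [Bool.and_eq_true, decide_eq_true_eq] at h2
        refine ⟨h2.1, h2.2, ?_⟩
        have h3 : t - (a : Int) + a = t := by ring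
        rwa [h3]
      · rintro ⟨h0, h1, h2⟩
        exact ⟨⟨x + a, h2, by ring⟩, by simp [h0, h1]⟩
    have hhead : (if here.isEmpty then ""
          else String.mk ((PySem.List.enumerate seg.toList 0).flatMap fun p =>
            if p.1 ∈ here then ['[', '[', p.2, ']', ']'] else [p.2]))
        = (if pvAny (pvP typo_indices) seg.toList a then
            String.mk (pvRender (pvP typo_indices) seg.toList a) else "") := by
      have hiff : here.isEmpty = true ↔ pvAny (pvP typo_indices) seg.toList a = false := by
        rw [List.isEmpty_iff, List.eq_nil_iff_forall_not_mem]
        rw [← Bool.not_eq_true, pvAny_iff]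
        constructor
        · intro h hex
          obtain ⟨k, hk, hp⟩ := hex
          simp only [pvP, decide_eq_true_eq] at hp
          refine h ((k : Int)) ((hmem _).2 ⟨by positivity, by exact_mod_cast (by omega : k < seg.length), ?_⟩)
          have : ((k : Int) + (a : Int)) = ((a + k : Nat) : Int) := by push_cast; ring
          rwa [this]
        · intro h x hx
          obtain ⟨h0, h1, h2⟩ := (hmem x).1 hx
          refine h ⟨x.toNat, ?_, ?_⟩
          · omega
          · simp only [pvP, decide_eq_true_eq]
            have : ((a + x.toNat : Nat) : Int) = x + a := by push_cast; omega
            rwa [this]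
      have hrend : ((PySem.List.enumerate seg.toList 0).flatMap fun p =>
            if p.1 ∈ here then ['[', '[', p.2, ']', ']'] else [p.2])
          = pvRender (pvP typo_indices) seg.toList a := by
        have h0 : ((0 : Int)) = ((0 : Nat) : Int) := by norm_num
        rw [h0, pvB_render seg.toList 0 (· ∈ here)]
        rw [pvRender_congr _ (fun j => pvP typo_indices (a + j)) seg.toList 0 ?_]
        · rw [pvRender_shift, Nat.add_zero]
        · intro j _ hj
          simp only [Nat.zero_add] at hj
          simp only [pvP]
          rw [decide_eq_decide, hmem]
          constructor
          · rintro ⟨_, _, h2⟩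
            have : ((j : Int) + a) = ((a + j : Nat) : Int) := by push_cast; ring
            rwa [this] at h2
          · intro h2
            refine ⟨by positivity, ?_, ?_⟩
            · rw [hlen]; exact_mod_cast hj
            · have : ((j : Int) + a) = ((a + j : Nat) : Int) := by push_cast; ring
              rwa [this]
      by_cases he : pvAny (pvP typo_indices) seg.toList a = true
      · have : here.isEmpty = false := by
          rw [← Bool.not_eq_true, hiff]; simp [he]
        rw [this, he]
        simp [hrend]
      · have he' : pvAny (pvP typo_indices) seg.toList a = false := by
          cases h : pvAny (pvP typo_indices) seg.toList a
          · rfl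
          · exact absurd h he
        rw [hiff.2 he', he']
        simp
    have hcomp : ((typo_indices.map fun t => t - (a : Int)).map fun t => t - (seg.length : Int))
        = typo_indices.map fun t => t - ((a + seg.toList.length : Nat) : Int) := by
      rw [List.map_map]
      refine List.map_congr_left fun t _ => ?_
      simp only [Function.comp]
      push_cast [← hlen]
      ring
    rw [hcomp, ih, hhead]

theorem get_segments_to_recorrect_spec : Claim_equal_get_segments_to_recorrect := by
  intro segments typo_indices max_length _
  unfold Spec_get_segments_to_recorrect
  unfold get_segments_to_recorrect
  rw [pv_toList_join]
  have hA := pvA_go segments [] [] typo_indices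
  simp only [List.nil_append, List.length_nil] at hA
  rw [hA]
  have hB := pvB_go segments typo_indices max_length 0
  simp only [Nat.cast_zero, sub_zero, List.map_id'] at hB
  rw [hB]
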